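-- pv_equiv track=rewrite | github.com/mattemusacchio/ML | asd.py | camino_binario
-- ===== SOURCE A (Python) =====
-- def camino_binario(n):
--     pasos = []
--     while n > 0:
--         if n % 2 == 0:
--             pasos.append("izquierda")
--             n = n // 2
--         else:
--             pasos.append("derecha")
--             n = (n - 1) // 2
--     return pasos[::-1]  # de raíz a hoja
-- ===== SOURCE B (Python) =====
-- def camino_binario(n):
--     if n <= 0:
--         return []
--     return ['derecha' if c == '1' else 'izquierda' for c in bin(n)[2:]]
-- ===== Notes on version B (the rewrite author's own statement) =====
-- stated objective: idiomatic
-- what changed: Replaces the iterative even/odd floor-division digit extraction plus final reversal with a single bin(n) string conversion mapped over in root-to-leaf order.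
import Mathlib
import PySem

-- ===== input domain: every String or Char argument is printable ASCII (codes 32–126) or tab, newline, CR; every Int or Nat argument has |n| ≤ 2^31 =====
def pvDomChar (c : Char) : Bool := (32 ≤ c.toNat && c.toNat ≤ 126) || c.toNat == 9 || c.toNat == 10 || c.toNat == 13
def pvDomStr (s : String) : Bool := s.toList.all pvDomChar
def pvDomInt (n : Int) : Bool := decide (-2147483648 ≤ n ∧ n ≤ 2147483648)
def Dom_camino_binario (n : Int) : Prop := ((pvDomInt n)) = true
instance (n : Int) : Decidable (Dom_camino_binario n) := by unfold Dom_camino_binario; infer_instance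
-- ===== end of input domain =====

-- B is the idiomatic rewrite: bin(n)[2:] mapped to step names (no loop state, no final reversal);
-- equivalence is about the return value only.

-- ===== PORT A =====
-- the while-loop of A: state is (n, pasos); appends LSB-first, then A reverses
def caminoLoop (n : Int) (pasos : List String) : List String :=
  if _h : n > 0 then
    if PySem.Int.mod n 2 = 0 then
      caminoLoop (PySem.Int.floordiv n 2) (pasos ++ ["izquierda"])
    else
      caminoLoop (PySem.Int.floordiv (n - 1) 2) (pasos ++ ["derecha"])
  else pasos
termination_by n.toNat
decreasing_by
  · rw [PySem.Int.floordiv_eq_ediv_of_pos (by omega)]; omega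
  · rw [PySem.Int.floordiv_eq_ediv_of_pos (by omega)]; omega


def camino_binario (n : Int) : List String :=
  (caminoLoop n []).reverse   -- pasos[::-1] is list reversal (exact)

-- ===== PORT B =====
-- bin(n)[2:] for n > 0: binary digits MSB-first (transliteration of CPython's binary expansion)
def binChars (m : Nat) : List Char :=
  if m = 0 then [] else binChars (m / 2) ++ [if m % 2 = 1 then '1' else '0']

def camino_binario_alt (n : Int) : List String :=
  if n ≤ 0 then []
  else (binChars n.toNat).map (fun c => if c = '1' then "derecha" else "izquierda")

-- ===== PRECONDITION & SPEC =====
def Spec_camino_binario (n : Int) (out : List String) : Prop := out = camino_binario_alt n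
instance (n : Int) (out : List String) : Decidable (Spec_camino_binario n out) := by unfold Spec_camino_binario; infer_instance

-- ===== CLAIM (what is proved, stated in full; the proofs are below) =====
def Claim_equal_camino_binario : Prop := ∀ (n : Int), Dom_camino_binario n → Spec_camino_binario n (camino_binario n)

-- ===== LEMMAS AND PROOFS =====
def stepName (c : Char) : String := if c = '1' then "derecha" else "izquierda"

lemma caminoLoop_eq (k : Nat) : ∀ (n : Int), n.toNat = k → ∀ (pasos : List String),
    caminoLoop n pasos = pasos ++ ((binChars n.toNat).map stepName).reverse := by
  induction k using Nat.strong_induction_on with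
  | _ k ih =>
    intro n hk pasos
    rw [caminoLoop]
    by_cases hn : n > 0
    · have hfd : PySem.Int.floordiv n 2 = n / 2 := PySem.Int.floordiv_eq_ediv_of_pos (by omega)
      have hfd' : PySem.Int.floordiv (n - 1) 2 = (n - 1) / 2 := PySem.Int.floordiv_eq_ediv_of_pos (by omega)
      have hmod : PySem.Int.mod n 2 = n % 2 := PySem.Int.mod_eq_emod_of_pos (by omega)
      have hnat : (n / 2).toNat = n.toNat / 2 := by omega
      have hbin : binChars n.toNat
          = binChars (n.toNat / 2) ++ [if n.toNat % 2 = 1 then '1' else '0'] := by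
        rw [binChars]; simp [show ¬ n.toNat = 0 by omega]
      simp only [hn, dif_pos, hfd, hfd', hmod]
      by_cases he : n % 2 = 0
      · rw [if_pos he, ih (n / 2).toNat (by omega) _ rfl]
        have h1 : n.toNat % 2 = 0 := by omega
        rw [hbin, ← hnat]
        simp [stepName, h1, List.map_append]
      · rw [if_neg he]
        have hodd : n % 2 = 1 := by omega
        have heq : (n - 1) / 2 = n / 2 := by omega
        rw [heq, ih (n / 2).toNat (by omega) _ rfl]
        have h1 : n.toNat % 2 = 1 := by omega
        rw [hbin, ← hnat]
        simp [stepName, h1, List.map_append]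
    · have h0 : n.toNat = 0 := by omega
      rw [dif_neg hn, h0, binChars]
      simp

-- ===== VERDICT (by name: the statement is the Claim_ definition above) =====
theorem camino_binario_spec : Claim_equal_camino_binario := by
  intro n _
  unfold Spec_camino_binario camino_binario camino_binario_alt
  rw [caminoLoop_eq n.toNat n rfl []]
  by_cases hn : n ≤ 0
  · have : n.toNat = 0 := by omega
    simp [hn, this, binChars]
  · simp only [if_neg hn, List.nil_append, List.reverse_reverse]
    rfl
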